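-- pv_equiv track=rewrite | github.com/kylew1004/algorithm | Programmers/Level2/광물_캐기.py | solution
-- ===== SOURCE A (Python) =====
-- import math
--
-- def solution(picks, minerals):
--     answer = 0
--     cnt = [[0, 0, 0, 0] for _ in range(math.ceil(len(minerals) / 5))] # [dia, iron, stone, total]
--     minerals_length = len(minerals)
--
--     for i in range(minerals_length):
--         idx = i // 5
--         if minerals[i] == "diamond":
--             cnt[idx][0] += 1
--         elif minerals[i] == "iron":
--             cnt[idx][1] += 1
--         elif minerals[i] == "stone":
--             cnt[idx][2] += 1
--         if (i + 1) % 5 == 0 or (i + 1) == minerals_length: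
--             cnt[idx][3] = 25 * cnt[idx][0] + 5 * cnt[idx][1] + cnt[idx][2]
--
--     if minerals_length > 5 * sum(picks):
--         cnt.pop()
--
--     cnt.sort(key=lambda x : x[3], reverse=True)
--
--     for i in range(len(cnt)):
--         if picks[0]:
--             answer += sum(cnt[i][0:3])
--             picks[0] -= 1
--         elif picks[1]:
--             answer += 5 * cnt[i][0] + sum(cnt[i][1:3])
--             picks[1] -= 1
--         elif picks[2]:
--             answer += cnt[i][3]
--             picks[2] -= 1
--
--     return answer
-- ===== SOURCE B (Python) =====
-- # B: counting sort by fatigue total (0..125 buckets) replaces the comparison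
-- # sort, and the groups are built by chunk-and-count instead of an index loop.
-- # Mutates picks in place like the original problem expects.
-- def solution(picks, minerals):
--     groups = []
--     i = 0
--     while i < len(minerals):
--         chunk = minerals[i:i + 5]
--         groups.append((chunk.count("diamond"), chunk.count("iron"), chunk.count("stone")))
--         i += 5
--     if len(minerals) > 5 * sum(picks):
--         groups.pop()
--     # the fatigue total 25*d + 5*f + s of a 5-mineral group lies in 0..125,
--     # so bucketing by total is a counting sort (stable: buckets keep order)
--     buckets = [[] for _ in range(126)]
--     for d, f, s in groups:
--         buckets[25 * d + 5 * f + s].append((d, f, s))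
--     answer = 0
--     for total in range(125, -1, -1):
--         for d, f, s in buckets[total]:
--             if picks[0]:
--                 answer += d + f + s
--                 picks[0] -= 1
--             elif picks[1]:
--                 answer += 5 * d + f + s
--                 picks[1] -= 1
--             elif picks[2]:
--                 answer += total
--                 picks[2] -= 1
--     return answer
-- ===== Notes on version B (the rewrite author's own statement) =====
-- stated objective: alternative
-- what changed: B replaces the comparison sort by a counting sort: since a 5-mineral group's fatigue total 25*d+5*f+s always lies in 0..125, B drops the groups into 126 buckets indexed by total and runs the greedy assignment by scanning the buckets from total 125 down to 0 (stable, so ties keep original order exactly like A's stable sort); groups are built by chunk-and-count instead of A's preallocated index/modify loop. Pre_ excludes exactly the inputs where A raises IndexError (pop from an empty group list, or a picks list of fewer than 3 entries that the greedy loop exhausts).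
import Mathlib
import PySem

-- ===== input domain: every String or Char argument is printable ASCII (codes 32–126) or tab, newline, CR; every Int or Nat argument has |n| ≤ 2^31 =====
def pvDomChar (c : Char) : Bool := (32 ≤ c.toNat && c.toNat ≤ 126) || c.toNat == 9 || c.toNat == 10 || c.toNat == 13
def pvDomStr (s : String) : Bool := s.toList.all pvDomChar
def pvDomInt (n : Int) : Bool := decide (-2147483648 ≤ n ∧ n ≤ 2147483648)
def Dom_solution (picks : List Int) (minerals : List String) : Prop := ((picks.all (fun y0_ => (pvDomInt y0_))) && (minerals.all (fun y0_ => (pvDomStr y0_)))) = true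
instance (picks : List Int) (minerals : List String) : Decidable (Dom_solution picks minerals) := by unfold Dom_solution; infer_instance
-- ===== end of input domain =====

-- B replaces A's comparison sort by a counting sort into 126 buckets indexed by the
-- group's fatigue total (always 0..125) and builds groups by chunk-and-count
-- (objective: alternative). A mutates picks in place; Python B performs the same
-- mutation; the equivalence proved here is about the return value.

-- ===== PORT A =====
-- group record [dia, iron, stone, total] as a 4-tuple
-- body of 'for i in range(minerals_length)'; minerals[i] has i in range there, so getD is exact
def pvStepA (minerals : List String) (n : Nat) (c : List (Int × Int × Int × Int)) (i : Nat) :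
    List (Int × Int × Int × Int) :=
  let idx := i / 5
  let c :=
    if minerals.getD i "" = "diamond" then c.modify idx (fun g => (g.1 + 1, g.2.1, g.2.2.1, g.2.2.2))
    else if minerals.getD i "" = "iron" then c.modify idx (fun g => (g.1, g.2.1 + 1, g.2.2.1, g.2.2.2))
    else if minerals.getD i "" = "stone" then c.modify idx (fun g => (g.1, g.2.1, g.2.2.1 + 1, g.2.2.2))
    else c
  if (i + 1) % 5 = 0 ∨ i + 1 = n then
    c.modify idx (fun g => (g.1, g.2.1, g.2.2.1, 25 * g.1 + 5 * g.2.1 + g.2.2.1))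
  else c

-- cnt = [[0,0,0,0] for _ in range(math.ceil(len(minerals)/5))], then the counting loop;
-- math.ceil(n/5) is exactly (n+4)/5 on Nat
def pvBuildA (minerals : List String) : List (Int × Int × Int × Int) :=
  (List.range minerals.length).foldl (pvStepA minerals minerals.length)
    (List.replicate ((minerals.length + 4) / 5) ((0 : Int), (0 : Int), (0 : Int), (0 : Int)))

-- body of the greedy loop: state (answer, picks[0], picks[1], picks[2]); 'if picks[0]:' is ≠ 0
def pvGreedyStep (st : Int × Int × Int × Int) (g : Int × Int × Int × Int) :
    Int × Int × Int × Int :=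
  let (ans, p0, p1, p2) := st
  if p0 ≠ 0 then (ans + (g.1 + g.2.1 + g.2.2.1), p0 - 1, p1, p2)
  else if p1 ≠ 0 then (ans + (5 * g.1 + (g.2.1 + g.2.2.1)), p0, p1 - 1, p2)
  else if p2 ≠ 0 then (ans + g.2.2.2, p0, p1, p2 - 1)
  else (ans, p0, p1, p2)

def solution (picks : List Int) (minerals : List String) : Int :=
  let n := minerals.length
  let cnt := pvBuildA minerals
  -- cnt.pop(); pop? is none only on the empty list (IndexError, outside Pre_solution)
  let cnt := if (n : Int) > 5 * picks.sum then
      (match PySem.List.pop? cnt with | some (_, r) => r | none => cnt)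
    else cnt
  let cnt := PySem.List.sorted cnt (fun g => g.2.2.2) true
  -- 'for i in range(len(cnt)): … cnt[i] …' reads each element once, in order
  (cnt.foldl pvGreedyStep (0, picks.getD 0 0, picks.getD 1 0, picks.getD 2 0)).1

-- ===== PORT B =====
-- while i < len(minerals): chunk = minerals[i:i+5]; groups.append((d, f, s)); i += 5
def pvChunksB (m : List String) (i : Nat) : List (Int × Int × Int) :=
  if h : i < m.length then
    let chunk := PySem.List.slice m (some (i : Int)) (some ((i : Int) + 5))
    (PySem.List.count chunk "diamond", PySem.List.count chunk "iron",
      PySem.List.count chunk "stone") :: pvChunksB m (i + 5)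
  else []
termination_by m.length - i

-- buckets[25*d+5*f+s].append((d,f,s)); the total of a group of ≤ 5 minerals is in
-- 0..125, so the index is always in range and List.modify is exact for the in-place append
def pvBucketsB (gs : List (Int × Int × Int)) : List (List (Int × Int × Int)) :=
  gs.foldl
    (fun bs g => bs.modify (25 * g.1 + 5 * g.2.1 + g.2.2).toNat (fun b => b ++ [g]))
    (List.replicate 126 [])

-- body of 'for d, f, s in buckets[total]' with state (answer, picks[0], picks[1], picks[2])
def pvStepB (total : Int) (st : Int × Int × Int × Int) (g : Int × Int × Int) :
    Int × Int × Int × Int :=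
  let (ans, p0, p1, p2) := st
  if p0 ≠ 0 then (ans + (g.1 + g.2.1 + g.2.2), p0 - 1, p1, p2)
  else if p1 ≠ 0 then (ans + (5 * g.1 + g.2.1 + g.2.2), p0, p1 - 1, p2)
  else if p2 ≠ 0 then (ans + total, p0, p1, p2 - 1)
  else (ans, p0, p1, p2)

def solution_alt (picks : List Int) (minerals : List String) : Int :=
  let gs := pvChunksB minerals 0
  -- groups.pop(); pop? is none only on the empty list (IndexError, outside Pre_solution)
  let gs := if (minerals.length : Int) > 5 * picks.sum then
      (match PySem.List.pop? gs with | some (_, r) => r | none => gs)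
    else gs
  let bs := pvBucketsB gs
  -- 'for total in range(125, -1, -1): for d, f, s in buckets[total]: …'
  ((PySem.List.pyRange 125 (-1) (-1)).foldl
      (fun st t => (PySem.List.pyGetD bs t []).foldl (pvStepB t) st)
      (0, picks.getD 0 0, picks.getD 1 0, picks.getD 2 0)).1

-- ===== PRECONDITION & SPEC =====
-- Pre_ excludes exactly the inputs where A raises IndexError: the pop() from an empty
-- group list (no minerals with a negative pick sum), and a picks list of fewer than
-- 3 entries that the greedy loop exhausts (it then reads a missing picks[1]/picks[2]);
-- g below is the number of mined groups, a closed form over the input sizes.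
def Pre_solution (picks : List Int) (minerals : List String) : Prop :=
  let n := minerals.length
  let g : Int := ((n + 4) / 5 : Nat) - (if (n : Int) > 5 * picks.sum then 1 else 0)
  ¬ ((n = 0 ∧ picks.sum < 0)
     ∨ (picks.length = 0 ∧ 1 ≤ g)
     ∨ (picks.length = 1 ∧ 0 ≤ picks.getD 0 0 ∧ picks.getD 0 0 < g)
     ∨ (picks.length = 2 ∧ 0 ≤ picks.getD 0 0 ∧ 0 ≤ picks.getD 1 0 ∧
          picks.getD 0 0 + picks.getD 1 0 < g))
instance (picks : List Int) (minerals : List String) : Decidable (Pre_solution picks minerals) := by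
  unfold Pre_solution; infer_instance

def pvWitness_solution : List Int × List String :=
  ([1, 2, 1], ["diamond", "stone", "iron", "rock", "stone", "iron", "diamond"])

def Spec_solution (picks : List Int) (minerals : List String) (out : Int) : Prop := out = solution_alt picks minerals
instance (picks : List Int) (minerals : List String) (out : Int) : Decidable (Spec_solution picks minerals out) := by unfold Spec_solution; infer_instance

-- ===== CLAIM (what is proved, stated in full; the proofs are below) =====
def Claim_equal_solution : Prop := ∀ (picks : List Int) (minerals : List String), Dom_solution picks minerals → Pre_solution picks minerals → Spec_solution picks minerals (solution picks minerals)

-- ===== LEMMAS AND PROOFS =====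

-- the fatigue total of a count triple, and the embedding of B's triples into A's records
def pvKB (g : Int × Int × Int) : Int := 25 * g.1 + 5 * g.2.1 + g.2.2
def pvEmb (g : Int × Int × Int) : Int × Int × Int × Int := (g.1, g.2.1, g.2.2, pvKB g)

-- the group record made from one chunk of ≤ 5 minerals
def pvMkG (c : List String) : Int × Int × Int × Int :=
  ((c.count "diamond" : Int), (c.count "iron" : Int), (c.count "stone" : Int),
   25 * (c.count "diamond" : Int) + 5 * (c.count "iron" : Int) + (c.count "stone" : Int))

-- A's step restricted to the head group (slot 0)
def pvStep1 (minerals : List String) (n : Nat) (g : Int × Int × Int × Int) (i : Nat) :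
    Int × Int × Int × Int :=
  let g :=
    if minerals.getD i "" = "diamond" then (g.1 + 1, g.2.1, g.2.2.1, g.2.2.2)
    else if minerals.getD i "" = "iron" then (g.1, g.2.1 + 1, g.2.2.1, g.2.2.2)
    else if minerals.getD i "" = "stone" then (g.1, g.2.1, g.2.2.1 + 1, g.2.2.2)
    else g
  if (i + 1) % 5 = 0 ∨ i + 1 = n then (g.1, g.2.1, g.2.2.1, 25 * g.1 + 5 * g.2.1 + g.2.2.1)
  else g

theorem pvStepA_cons_head (m : List String) (n : Nat) (g : Int × Int × Int × Int)
    (t : List (Int × Int × Int × Int)) (i : Nat) (h : i < 5) :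
    pvStepA m n (g :: t) i = pvStep1 m n g i :: t := by
  have hdiv : i / 5 = 0 := Nat.div_eq_of_lt h
  simp only [pvStepA, pvStep1, hdiv, List.modify]
  split_ifs <;> simp

theorem pvStepA_cons_shift (c5 rest : List String) (n : Nat) (g : Int × Int × Int × Int)
    (t : List (Int × Int × Int × Int)) (i : Nat) (h5 : c5.length = 5) (hi : 5 ≤ i)
    (hn : 5 ≤ n) :
    pvStepA (c5 ++ rest) n (g :: t) i = g :: pvStepA rest (n - 5) t (i - 5) := by
  obtain ⟨j, rfl⟩ : ∃ j, i = j + 5 := ⟨i - 5, by omega⟩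
  have hdiv : (j + 5) / 5 = j / 5 + 1 := by omega
  have hget : (c5 ++ rest).getD (j + 5) "" = rest.getD j "" := by
    rw [List.getD_append_right _ _ _ _ (by omega)]
    simp [h5]
  have hsub : j + 5 - 5 = j := by omega
  have hcond2 : ((j + 5 + 1) % 5 = 0 ∨ j + 5 + 1 = n) = ((j + 1) % 5 = 0 ∨ j + 1 = n - 5) := by
    apply propext; omega
  simp only [pvStepA, hdiv, hget, hsub, hcond2]
  split_ifs <;> simp [List.modify_cons]

theorem pvFoldl_head {α β : Type} (f : List β → α → List β) (f1 : β → α → β)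
    (t : List β) (l : List α) (h : ∀ g a, a ∈ l → f (g :: t) a = f1 g a :: t) :
    ∀ g, l.foldl f (g :: t) = l.foldl f1 g :: t := by
  induction l with
  | nil => intro g; rfl
  | cons a l ih =>
    intro g
    simp only [List.foldl_cons, h g a (by simp)]
    exact ih (fun g a ha => h g a (by simp [ha])) _

theorem pvFoldl_tail {α β : Type} (f : List β → α → List β) (f2 : List β → α → List β)
    (g : β) (l : List α) (h : ∀ t a, a ∈ l → f (g :: t) a = g :: f2 t a) :
    ∀ t, l.foldl f (g :: t) = g :: l.foldl f2 t := by
  induction l with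
  | nil => intro t; rfl
  | cons a l ih =>
    intro t
    simp only [List.foldl_cons, h t a (by simp)]
    exact ih (fun t a ha => h t a (by simp [ha])) _

theorem pvFoldl_counts (m : List String) (n k : Nat)
    (hk : ∀ i, i < k → (i + 1) % 5 ≠ 0 ∧ i + 1 ≠ n) (hkm : k ≤ m.length) :
    (List.range k).foldl (pvStep1 m n) (0, 0, 0, 0)
      = (((m.take k).count "diamond" : Int), ((m.take k).count "iron" : Int),
         ((m.take k).count "stone" : Int), 0) := by
  induction k with
  | zero => simp
  | succ k ih =>
    rw [List.range_succ, List.foldl_append]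
    rw [ih (fun i hi => hk i (by omega)) (by omega)]
    have hklt : k < m.length := by omega
    have hget : m.getD k "" = m[k] := List.getD_eq_getElem m "" hklt
    have htake : m.take (k + 1) = m.take k ++ [m[k]] := by
      rw [List.take_add_one]
      simp [List.getElem?_eq_getElem hklt]
    have hcond : ¬ ((k + 1) % 5 = 0 ∨ k + 1 = n) := by
      have := hk k (by omega); push_neg; omega
    simp only [List.foldl_cons, List.foldl_nil, pvStep1, hget, hcond, if_false, htake,
      List.count_append]
    by_cases hd : m[k] = "diamond"
    · simp [hd]
    · by_cases hi : m[k] = "iron"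
      · simp [hd, hi]
      · by_cases hs : m[k] = "stone"
        · simp [hd, hi, hs]
        · simp [hd, hi, hs]

theorem pvFoldl_block (m : List String) (n k : Nat) (hkm : k ≤ m.length) (h1k : 1 ≤ k)
    (hfire : ∀ i, i < k - 1 → (i + 1) % 5 ≠ 0 ∧ i + 1 ≠ n) (hlast : k % 5 = 0 ∨ k = n) :
    (List.range k).foldl (pvStep1 m n) (0, 0, 0, 0) = pvMkG (m.take k) := by
  obtain ⟨k', rfl⟩ : ∃ k', k = k' + 1 := ⟨k - 1, by omega⟩
  rw [List.range_succ, List.foldl_append]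
  rw [pvFoldl_counts m n k' (fun i hi => hfire i (by omega)) (by omega)]
  have hklt : k' < m.length := by omega
  have hget : m.getD k' "" = m[k'] := List.getD_eq_getElem m "" hklt
  have htake : m.take (k' + 1) = m.take k' ++ [m[k']] := by
    rw [List.take_add_one]
    simp [List.getElem?_eq_getElem hklt]
  have hcond : ((k' + 1) % 5 = 0 ∨ k' + 1 = n) := hlast
  simp only [List.foldl_cons, List.foldl_nil, pvStep1, hget, hcond, if_true, htake,
    List.count_append, pvMkG]
  by_cases hd : m[k'] = "diamond"
  · simp [hd]
  · by_cases hi : m[k'] = "iron"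
    · simp [hd, hi]
    · by_cases hs : m[k'] = "stone"
      · simp [hd, hi, hs]
      · simp [hd, hi, hs]

def pvChunksR : List String → List (Int × Int × Int × Int)
  | [] => []
  | x :: xs => pvMkG ((x :: xs).take 5) :: pvChunksR ((x :: xs).drop 5)
  termination_by l => l.length
  decreasing_by simp

theorem pvChunksR_ne_nil (m : List String) (h : m ≠ []) :
    pvChunksR m = pvMkG (m.take 5) :: pvChunksR (m.drop 5) := by
  cases m with
  | nil => exact absurd rfl h
  | cons x xs => rw [pvChunksR]

theorem pvBuildA_eq_chunks (m : List String) : pvBuildA m = pvChunksR m := by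
  by_cases h5 : m.length ≤ 5
  · cases m with
    | nil => rw [pvChunksR]; rfl
    | cons x xs =>
      have hlc : (x :: xs).length = xs.length + 1 := rfl
      have hn : 1 ≤ (x :: xs).length := by simp
      have hrep : ((x :: xs).length + 4) / 5 = 1 := by
        simp only [List.length_cons] at h5 ⊢; omega
      rw [pvBuildA, hrep]
      have hhead : ∀ g a, a ∈ List.range (x :: xs).length →
          pvStepA (x :: xs) (x :: xs).length (g :: []) a
            = pvStep1 (x :: xs) (x :: xs).length g a :: [] := by
        intro g a ha
        exact pvStepA_cons_head _ _ _ _ _ (by simp at ha; rw [hlc] at h5; omega)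
      rw [show (List.replicate 1 ((0:Int),(0:Int),(0:Int),(0:Int)))
            = ((0:Int),(0:Int),(0:Int),(0:Int)) :: [] from rfl]
      rw [pvFoldl_head _ _ _ _ hhead]
      rw [pvFoldl_block (x :: xs) (x :: xs).length (x :: xs).length le_rfl hn
        (fun i hi => by rw [hlc] at h5 hi ⊢; constructor <;> omega) (Or.inr rfl)]
      rw [pvChunksR_ne_nil _ (by simp)]
      have ht : (x :: xs).take 5 = x :: xs := List.take_of_length_le h5
      have hd : (x :: xs).drop 5 = [] := List.drop_eq_nil_of_le h5
      rw [List.take_length, ht, hd, pvChunksR]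
  · push_neg at h5
    have hm : m = m.take 5 ++ m.drop 5 := (List.take_append_drop 5 m).symm
    have hlen5 : (m.take 5).length = 5 := by simp; omega
    have hlrest : (m.drop 5).length = m.length - 5 := by simp
    have ih := pvBuildA_eq_chunks (m.drop 5)
    rw [pvBuildA]
    have hrep : (m.length + 4) / 5 = ((m.drop 5).length + 4) / 5 + 1 := by
      rw [hlrest]; omega
    rw [hrep, List.replicate_succ]
    have hsplit : List.range m.length
        = List.range 5 ++ (List.range (m.length - 5)).map (fun j => 5 + j) := by
      conv_lhs => rw [show m.length = 5 + (m.length - 5) by omega]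
      exact List.range_add
    rw [hsplit, List.foldl_append]
    -- phase 1: the first five indices build the head group completely
    have hhead : ∀ g a, a ∈ List.range 5 →
        pvStepA m m.length (g :: List.replicate (((m.drop 5).length + 4) / 5)
            ((0:Int),(0:Int),(0:Int),(0:Int))) a
          = pvStep1 m m.length g a :: List.replicate (((m.drop 5).length + 4) / 5)
            ((0:Int),(0:Int),(0:Int),(0:Int)) := by
      intro g a ha
      exact pvStepA_cons_head _ _ _ _ _ (by simp at ha; omega)
    rw [pvFoldl_head _ _ _ _ hhead]
    rw [pvFoldl_block m m.length 5 (by omega) (by omega)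
      (fun i hi => by constructor <;> omega) (Or.inl (by decide))]
    -- phase 2: the remaining indices only touch the tail
    rw [List.foldl_map]
    have htail : ∀ t a, a ∈ List.range (m.length - 5) →
        pvStepA m m.length (pvMkG (m.take 5) :: t) (5 + a)
          = pvMkG (m.take 5) :: pvStepA (m.drop 5) (m.length - 5) t a := by
      intro t a ha
      have := pvStepA_cons_shift (m.take 5) (m.drop 5) m.length (pvMkG (m.take 5)) t
        (5 + a) hlen5 (by omega) (by omega)
      rw [← hm] at this
      rw [this]
      congr 1
      congr 1
      omega
    rw [pvFoldl_tail _ (pvStepA (m.drop 5) (m.length - 5)) _ _ htail]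
    rw [show m.length - 5 = (m.drop 5).length from hlrest.symm]
    rw [show (List.range (m.drop 5).length).foldl (pvStepA (m.drop 5) (m.drop 5).length)
          (List.replicate (((m.drop 5).length + 4) / 5) ((0:Int),(0:Int),(0:Int),(0:Int)))
        = pvBuildA (m.drop 5) from rfl]
    rw [ih, pvChunksR_ne_nil m (by intro h; rw [h] at h5; simp at h5)]
termination_by m.length
decreasing_by simp; omega

theorem pvChunksB_map (m : List String) (i : Nat) :
    (pvChunksB m i).map pvEmb = pvChunksR (m.drop i) := by
  rw [pvChunksB]
  by_cases h : i < m.length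
  · simp only [h, dif_pos]
    have hch : PySem.List.slice m (some (i : Int)) (some ((i : Int) + 5))
        = (m.drop i).take 5 := by
      have hcast : ((i : Int) + 5) = ((i + 5 : Nat) : Int) := by push_cast; ring
      rw [hcast, PySem.List.slice_natCast]
      congr 1
      omega
    rw [List.map_cons, pvChunksB_map m (i + 5)]
    rw [pvChunksR_ne_nil (m.drop i) (by
      intro hnil
      have := congrArg List.length hnil
      simp at this
      omega)]
    rw [List.drop_drop]
    simp only [hch, pvMkG, pvEmb, pvKB, PySem.List.count_eq]
  · simp only [h, dif_neg, not_false_eq_true, List.map_nil]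
    have : m.drop i = [] := List.drop_eq_nil_of_le (by omega)
    rw [this, pvChunksR]
termination_by m.length - i

-- a chunk contains at most 5 minerals, and at most chunk-many of each kind
theorem pvCount3_le (l : List String) :
    l.count "diamond" + l.count "iron" + l.count "stone" ≤ l.length := by
  induction l with
  | nil => simp
  | cons x xs ih =>
    simp only [List.count_cons, List.length_cons]
    by_cases hd : x = "diamond"
    · simp [hd]; omega
    · by_cases hi : x = "iron"
      · simp [hd, hi]; omega
      · by_cases hs : x = "stone"
        · simp [hd, hi, hs]; omega
        · simp [hd, hi, hs]; omega

theorem pvChunksB_bounds (m : List String) (i : Nat) :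
    ∀ g ∈ pvChunksB m i, 0 ≤ pvKB g ∧ pvKB g ≤ 125 := by
  rw [pvChunksB]
  by_cases h : i < m.length
  · simp only [h, dif_pos, List.mem_cons]
    intro g hg
    rcases hg with hg | hg
    · subst hg
      have hch : PySem.List.slice m (some (i : Int)) (some ((i : Int) + 5))
          = (m.drop i).take 5 := by
        have hcast : ((i : Int) + 5) = ((i + 5 : Nat) : Int) := by push_cast; ring
        rw [hcast, PySem.List.slice_natCast]
        congr 1
        omega
      have hlen : ((m.drop i).take 5).length ≤ 5 := by
        simp [List.length_take]
      have hcnt := pvCount3_le ((m.drop i).take 5)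
      simp only [pvKB, hch, PySem.List.count_eq]
      push_cast
      omega
    · exact pvChunksB_bounds m (i + 5) g hg
  · simp [h]
termination_by m.length - i

-- === stable insertion sort into descending key buckets ===

theorem pvInsertBy_skip {α : Type} (bf : α → α → Bool) (x : α) (ys zs : List α)
    (h : ∀ y ∈ ys, bf x y = false) :
    PySem.List.insertBy bf x (ys ++ zs) = ys ++ PySem.List.insertBy bf x zs := by
  induction ys with
  | nil => rfl
  | cons y ys ih =>
    have hy : bf x y = false := h y (by simp)
    show (if bf x y then x :: (y :: (ys ++ zs)) else y :: PySem.List.insertBy bf x (ys ++ zs))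
        = y :: (ys ++ PySem.List.insertBy bf x zs)
    rw [hy]
    simp only [Bool.false_eq_true, if_false]
    rw [ih (fun y hy => h y (by simp [hy]))]

theorem pvInsertBy_front {α : Type} (bf : α → α → Bool) (x : α) (zs : List α)
    (h : ∀ z ∈ zs, bf x z = true) :
    PySem.List.insertBy bf x zs = x :: zs := by
  cases zs with
  | nil => rfl
  | cons z zs =>
    have hz : bf x z = true := h z (by simp)
    show (if bf x z then x :: (z :: zs) else z :: PySem.List.insertBy bf x zs) = x :: z :: zs
    rw [hz]
    simp

-- the bucket concatenation: for each key value t of vs, in order, the elements of p with that key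
def pvFlat {α : Type} (key : α → Int) (vs : List Int) (p : List α) : List α :=
  vs.flatMap (fun t => p.filter (fun g => decide (key g = t)))

theorem pvFlat_key {α : Type} (key : α → Int) (vs : List Int) (p : List α) (z : α)
    (hz : z ∈ pvFlat key vs p) : key z ∈ vs := by
  simp only [pvFlat, List.mem_flatMap, List.mem_filter, decide_eq_true_eq] at hz
  obtain ⟨t, ht, _, hk⟩ := hz
  rw [hk]; exact ht

theorem pvFlat_irrelevant {α : Type} (key : α → Int) (vs : List Int) (p : List α) (x : α)
    (hx : key x ∉ vs) : pvFlat key vs (p ++ [x]) = pvFlat key vs p := by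
  unfold pvFlat
  apply congrArg List.flatten
  apply List.map_congr_left
  intro t ht
  rw [List.filter_append]
  have hne : key x ≠ t := fun h => hx (h ▸ ht)
  simp [hne]

theorem pvBucketInsert {α : Type} (key : α → Int) (vs : List Int)
    (hvs : vs.Pairwise (· > ·)) (x : α) (hx : key x ∈ vs) (p : List α) :
    PySem.List.insertBy (fun a b => decide (key b < key a)) x (pvFlat key vs p)
      = pvFlat key vs (p ++ [x]) := by
  induction vs with
  | nil => exact absurd hx (by simp)
  | cons t vs ih =>
    have hgt : ∀ t' ∈ vs, t > t' := (List.pairwise_cons.mp hvs).1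
    have hflat : pvFlat key (t :: vs) p
        = p.filter (fun g => decide (key g = t)) ++ pvFlat key vs p := by
      simp [pvFlat]
    rw [hflat]
    by_cases hxt : key x = t
    · -- x joins the head bucket, after its current members
      rw [pvInsertBy_skip _ _ _ _ (by
        intro y hy
        have : key y = t := by
          simp only [List.mem_filter, decide_eq_true_eq] at hy
          exact hy.2
        simp [this, hxt])]
      rw [pvInsertBy_front _ _ _ (by
        intro z hz
        have := pvFlat_key key vs p z hz
        have := hgt _ this
        simp only [decide_eq_true_eq]
        omega)]
      have hxnot : key x ∉ vs := by
        intro hmem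
        have := hgt _ hmem
        omega
      rw [show pvFlat key (t :: vs) (p ++ [x])
            = (p ++ [x]).filter (fun g => decide (key g = t)) ++ pvFlat key vs (p ++ [x]) by
          simp [pvFlat]]
      rw [pvFlat_irrelevant key vs p x hxnot, List.filter_append]
      have : ([x].filter (fun g => decide (key g = t))) = [x] := by
        simp [hxt]
      rw [this]
      simp
    · -- x belongs to a later bucket: skip the head bucket and recurse
      have hxvs : key x ∈ vs := by
        rcases List.mem_cons.mp hx with h | h
        · exact absurd h hxt
        · exact h
      rw [pvInsertBy_skip _ _ _ _ (by
        intro y hy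
        have hky : key y = t := by
          simp only [List.mem_filter, decide_eq_true_eq] at hy
          exact hy.2
        have := hgt _ hxvs
        simp only [decide_eq_false_iff_not, not_lt, hky]
        omega)]
      rw [ih (List.pairwise_cons.mp hvs).2 hxvs]
      rw [show pvFlat key (t :: vs) (p ++ [x])
            = (p ++ [x]).filter (fun g => decide (key g = t)) ++ pvFlat key vs (p ++ [x]) by
          simp [pvFlat]]
      rw [List.filter_append]
      have : ([x].filter (fun g => decide (key g = t))) = [] := by
        simp [hxt]
      rw [this]
      simp

theorem pvFoldl_insert {α : Type} (key : α → Int) (vs : List Int)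
    (hvs : vs.Pairwise (· > ·)) :
    ∀ (xs p : List α), (∀ g ∈ xs, key g ∈ vs) →
      xs.foldl (fun acc x => PySem.List.insertBy (fun a b => decide (key b < key a)) x acc)
        (pvFlat key vs p) = pvFlat key vs (p ++ xs) := by
  intro xs
  induction xs with
  | nil => intro p _; simp
  | cons x xs ih =>
    intro p h
    simp only [List.foldl_cons]
    rw [pvBucketInsert key vs hvs x (h x (by simp)) p]
    rw [ih (p ++ [x]) (fun g hg => h g (by simp [hg]))]
    simp

-- sorted(xs, key, reverse=True) is the concatenation of the (stable) key buckets,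
-- scanned along any strictly decreasing list vs covering all keys
theorem pvSorted_eq_flat {α : Type} (key : α → Int) (vs : List Int)
    (hvs : vs.Pairwise (· > ·)) (xs : List α) (h : ∀ g ∈ xs, key g ∈ vs) :
    PySem.List.sorted xs key true = pvFlat key vs xs := by
  rw [PySem.List.sorted_rev_eq_foldl_insertBy]
  have h0 : pvFlat key vs ([] : List α) = [] := by
    simp [pvFlat]
  have := pvFoldl_insert key vs hvs xs [] h
  rw [h0] at this
  rw [this]
  simp

-- === the bucket array built by B is exactly the key buckets ===

theorem pvBucketsFold_getD (gs : List (Int × Int × Int)) :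
    ∀ (init : List (List (Int × Int × Int))), init.length = 126 →
      (∀ g ∈ gs, 0 ≤ pvKB g ∧ pvKB g ≤ 125) → ∀ (t : Nat), t < 126 →
      (gs.foldl
          (fun bs g => bs.modify (25 * g.1 + 5 * g.2.1 + g.2.2).toNat (fun b => b ++ [g]))
          init).getD t []
        = init.getD t [] ++ gs.filter (fun g => decide (pvKB g = (t : Int))) := by
  induction gs with
  | nil => intro init _ _ t _; simp
  | cons g gs ih =>
    intro init hlen hb t ht
    have hg := hb g (by simp)
    simp only [List.foldl_cons]
    rw [ih _ (by rw [List.length_modify]; exact hlen) (fun g hg => hb g (by simp [hg])) t ht]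
    have hmod : (init.modify (25 * g.1 + 5 * g.2.1 + g.2.2).toNat
          (fun b => b ++ [g])).getD t []
        = if (25 * g.1 + 5 * g.2.1 + g.2.2).toNat = t then init.getD t [] ++ [g]
          else init.getD t [] := by
      rw [List.getD_eq_getElem?_getD, List.getElem?_modify]
      have htlt : t < init.length := by omega
      have : init[t]? = some (init.getD t []) := by
        rw [List.getElem?_eq_getElem htlt, List.getD_eq_getElem init [] htlt]
      rw [this]
      split_ifs <;> simp
    rw [hmod]
    have hiff : ((25 * g.1 + 5 * g.2.1 + g.2.2).toNat = t) ↔ (pvKB g = (t : Int)) := by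
      unfold pvKB at hg ⊢
      omega
    by_cases hk : pvKB g = (t : Int)
    · rw [if_pos (hiff.mpr hk), List.filter_cons_of_pos (by simpa using hk)]
      simp
    · rw [if_neg (fun hc => hk (hiff.mp hc)), List.filter_cons_of_neg (by simpa using hk)]

theorem pvBucketsFold_length (gs : List (Int × Int × Int)) :
    ∀ (init : List (List (Int × Int × Int))),
      (gs.foldl
          (fun bs g => bs.modify (25 * g.1 + 5 * g.2.1 + g.2.2).toNat (fun b => b ++ [g]))
          init).length = init.length := by
  induction gs with
  | nil => intro init; rfl
  | cons g gs ih =>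
    intro init
    simp only [List.foldl_cons]
    rw [ih]
    exact List.length_modify _ _ _

theorem pvBucketsB_getD (gs : List (Int × Int × Int))
    (hb : ∀ g ∈ gs, 0 ≤ pvKB g ∧ pvKB g ≤ 125) (t : Nat) (ht : t < 126) :
    (pvBucketsB gs).getD t [] = gs.filter (fun g => decide (pvKB g = (t : Int))) := by
  unfold pvBucketsB
  rw [pvBucketsFold_getD gs _ (by simp) hb t ht]
  rw [List.getD_replicate _ ht]
  simp

-- vs = range(125, -1, -1) is strictly decreasing
theorem pvRange_desc : (PySem.List.pyRange 125 (-1) (-1)).Pairwise (· > ·) := by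
  rw [PySem.List.pyRange_neg_one_eq_reverse, List.pairwise_reverse]
  exact PySem.List.pairwise_lt_pyRange_one _ _

-- the two greedy bodies agree on a group of known total
theorem pvStep_agree (t : Int) (g : Int × Int × Int) (hk : pvKB g = t)
    (st : Int × Int × Int × Int) : pvGreedyStep st (pvEmb g) = pvStepB t st g := by
  obtain ⟨ans, p0, p1, p2⟩ := st
  simp only [pvGreedyStep, pvStepB, pvEmb, pvKB] at *
  split_ifs <;> simp <;> omega

-- ===== VERDICT (by name: the statement is the Claim_ definition above) =====
theorem solution_spec : Claim_equal_solution := by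
  intro picks minerals hdom hpre
  unfold Spec_solution
  -- shared group list: B's triples, and A's records as their embedding
  set gsB := (if ((minerals.length : Int) > 5 * picks.sum) then
      (pvChunksB minerals 0).dropLast else pvChunksB minerals 0) with hgsB
  have hbounds : ∀ g ∈ gsB, 0 ≤ pvKB g ∧ pvKB g ≤ 125 := by
    intro g hg
    apply pvChunksB_bounds minerals 0 g
    rw [hgsB] at hg
    split_ifs at hg with hc
    · exact List.mem_of_mem_dropLast hg
    · exact hg
  have hmapped : (if ((minerals.length : Int) > 5 * picks.sum) then
        (match PySem.List.pop? (pvBuildA minerals) with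
          | some (_, r) => r | none => pvBuildA minerals)
      else pvBuildA minerals) = gsB.map pvEmb := by
    have hA : pvBuildA minerals = (pvChunksB minerals 0).map pvEmb := by
      rw [pvBuildA_eq_chunks, pvChunksB_map minerals 0, List.drop_zero]
    rw [hgsB]
    split_ifs with hc
    · rw [hA]
      cases hch : pvChunksB minerals 0 with
      | nil => simp [PySem.List.pop?, PySem.List.pyIdx?]
      | cons g gs' =>
        simp only [List.map_cons]
        simp [PySem.List.pop?, PySem.List.pyIdx?]
        rw [List.eraseIdx_eq_dropLast (by simp)]
    · exact hA
  have hmB : (if ((minerals.length : Int) > 5 * picks.sum) then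
        (match PySem.List.pop? (pvChunksB minerals 0) with
          | some (_, r) => r | none => pvChunksB minerals 0)
      else pvChunksB minerals 0) = gsB := by
    rw [hgsB]
    split_ifs with hc
    · cases hch : pvChunksB minerals 0 with
      | nil => simp [PySem.List.pop?, PySem.List.pyIdx?]
      | cons g gs' =>
        simp [PySem.List.pop?, PySem.List.pyIdx?]
        rw [List.eraseIdx_eq_dropLast (by simp)]
    · rfl
  -- evaluate both programs
  show solution picks minerals = solution_alt picks minerals
  simp only [solution, solution_alt]
  rw [hmapped, hmB]
  -- A's side: stable sort = bucket concatenation along vs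
  have hkeys : ∀ g ∈ gsB.map pvEmb,
      (fun g : Int × Int × Int × Int => g.2.2.2) g ∈ PySem.List.pyRange 125 (-1) (-1) := by
    intro g hg
    obtain ⟨g', hg', rfl⟩ := List.mem_map.mp hg
    have := hbounds g' hg'
    rw [PySem.List.mem_pyRange_neg_one]
    simp only [pvEmb]
    exact ⟨by omega, by omega⟩
  rw [pvSorted_eq_flat _ _ pvRange_desc _ hkeys]
  unfold pvFlat
  rw [List.foldl_flatMap]
  -- compare the two scans over vs bucket by bucket
  apply congrArg (fun st : Int × Int × Int × Int => st.1)
  apply PySem.List.foldl_congr_mem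
  intro st t htvs
  have htr : -1 < t ∧ t ≤ 125 := PySem.List.mem_pyRange_neg_one.mp htvs
  -- B's bucket lookup
  have hblen : (pvBucketsB gsB).length = 126 := by
    unfold pvBucketsB
    rw [pvBucketsFold_length]
    simp
  have hget : PySem.List.pyGetD (pvBucketsB gsB) t []
      = gsB.filter (fun g => decide (pvKB g = t)) := by
    rw [PySem.List.pyGetD_eq_getElem _ _ (by omega) (by rw [hblen]; omega)]
    have h1 : (pvBucketsB gsB)[t.toNat] = (pvBucketsB gsB).getD t.toNat [] := by
      rw [List.getD_eq_getElem?_getD, List.getElem?_eq_getElem (by rw [hblen]; omega)]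
      rfl
    rw [h1, pvBucketsB_getD gsB hbounds t.toNat (by omega)]
    have : ((t.toNat : Nat) : Int) = t := Int.toNat_of_nonneg (by omega)
    rw [this]
  rw [hget]
  -- A's bucket contents are the embedded B bucket contents
  have hfil : (gsB.map pvEmb).filter (fun g => decide (g.2.2.2 = t))
      = (gsB.filter (fun g => decide (pvKB g = t))).map pvEmb := by
    rw [List.filter_map]
    rfl
  rw [hfil, List.foldl_map]
  -- the two greedy bodies agree inside the bucket
  apply PySem.List.foldl_congr_mem
  intro st' g hgfil
  have hk : pvKB g = t := by
    have := (List.mem_filter.mp hgfil).2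
    simpa using this
  exact pvStep_agree t g hk st'
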